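-- pv_equiv track=rewrite | github.com/brambet/Advent-of-Code | 2020/AoC_10.py | count_lengths_of_one_sublists
-- ===== SOURCE A (Python) =====
-- from typing import NamedTuple, Tuple, List
--
-- def count_lengths_of_one_sublists(difference_list: List[int]) -> List[int]:
--     counter = 0
--     length_list = []
--     for elt in difference_list:
--         if elt == 1:
--             counter += 1
--         if elt == 3:
--             length_list.append(counter)
--             counter = 0
--     return length_list
-- ===== SOURCE B (Python) =====
-- def count_lengths_of_one_sublists(difference_list):
--     # Split by 3 into segments, then count the 1s in every segment before a 3.
--     done = []
--     cur = []
--     for elt in difference_list: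
--         if elt == 3:
--             done.append(cur)
--             cur = []
--         else:
--             cur.append(elt)
--     return [seg.count(1) for seg in done]
-- ===== Notes on version B (the rewrite author's own statement) =====
-- stated objective: alternative
-- what changed: B first splits the list into segments delimited by 3 and then counts the 1s of each completed segment in a separate pass, instead of maintaining a running counter with emit-on-3.
import Mathlib
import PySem

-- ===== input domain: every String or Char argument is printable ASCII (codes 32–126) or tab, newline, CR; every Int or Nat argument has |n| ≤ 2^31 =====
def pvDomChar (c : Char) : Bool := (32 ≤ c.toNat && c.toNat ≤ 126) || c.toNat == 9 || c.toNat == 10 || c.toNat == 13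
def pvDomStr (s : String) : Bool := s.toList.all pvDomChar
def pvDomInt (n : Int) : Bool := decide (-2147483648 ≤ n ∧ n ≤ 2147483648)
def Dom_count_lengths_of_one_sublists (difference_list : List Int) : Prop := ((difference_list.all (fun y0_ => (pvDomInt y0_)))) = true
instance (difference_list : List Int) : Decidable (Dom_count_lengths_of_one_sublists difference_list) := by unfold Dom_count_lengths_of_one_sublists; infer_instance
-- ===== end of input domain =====

-- B splits the list into segments delimited by 3 and counts the 1s of each completed segment
-- in a separate pass (alternative decomposition, same cost), instead of A's running counter with emit-on-3.
-- ===== PORT A =====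
def count_lengths_of_one_sublists (difference_list : List Int) : List Int :=
  (difference_list.foldl
    (fun (st : Int × List Int) elt =>
      let counter := if elt = 1 then st.1 + 1 else st.1
      if elt = 3 then (0, st.2 ++ [counter]) else (counter, st.2))
    (0, [])).2

-- ===== PORT B =====
def count_lengths_of_one_sublists_alt (difference_list : List Int) : List Int :=
  let p := difference_list.foldl
    (fun (st : List (List Int) × List Int) elt =>
      if elt = 3 then (st.1 ++ [st.2], []) else (st.1, st.2 ++ [elt]))
    ([], [])
  p.1.map (fun seg => PySem.List.count seg 1)

-- ===== PRECONDITION & SPEC =====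
def Spec_count_lengths_of_one_sublists (difference_list : List Int) (out : List Int) : Prop := out = count_lengths_of_one_sublists_alt difference_list
instance (difference_list : List Int) (out : List Int) : Decidable (Spec_count_lengths_of_one_sublists difference_list out) := by unfold Spec_count_lengths_of_one_sublists; infer_instance

-- ===== CLAIM (what is proved, stated in full; the proofs are below) =====
def Claim_equal_count_lengths_of_one_sublists : Prop := ∀ (difference_list : List Int), Dom_count_lengths_of_one_sublists difference_list → Spec_count_lengths_of_one_sublists difference_list (count_lengths_of_one_sublists difference_list)

-- ===== LEMMAS AND PROOFS =====

-- ===== VERDICT (by name: the statement is the Claim_ definition above) =====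
lemma clos_invariant (dl : List Int) :
    ∀ (c : Int) (L : List Int) (done : List (List Int)) (cur : List Int),
      c = (PySem.List.count cur 1 : Int) →
      L = done.map (fun seg => (PySem.List.count seg 1 : Int)) →
      (dl.foldl
        (fun (st : Int × List Int) elt =>
          let counter := if elt = 1 then st.1 + 1 else st.1
          if elt = 3 then (0, st.2 ++ [counter]) else (counter, st.2))
        (c, L)).2
      = ((dl.foldl
          (fun (st : List (List Int) × List Int) elt =>
            if elt = 3 then (st.1 ++ [st.2], []) else (st.1, st.2 ++ [elt]))
          (done, cur)).1).map (fun seg => (PySem.List.count seg 1 : Int)) := by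
  induction dl with
  | nil => intro c L done cur hc hL; simpa using hL
  | cons x xs ih =>
    intro c L done cur hc hL
    simp only [List.foldl_cons]
    by_cases hx3 : x = 3
    · subst hx3
      have : ¬ ((3:Int) = 1) := by decide
      apply ih
      · simp [PySem.List.count]
      · simp [hL, hc, this]
    · simp only [if_neg hx3]
      apply ih
      · by_cases hx1 : x = 1
        · subst hx1
          simp [PySem.List.count_eq, hc, List.count_append]
        · simp only [if_neg hx1]
          simp [PySem.List.count_eq, hc, List.count_append, hx1]
      · exact hL

theorem count_lengths_of_one_sublists_spec : Claim_equal_count_lengths_of_one_sublists := by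
  intro dl _
  unfold Spec_count_lengths_of_one_sublists count_lengths_of_one_sublists count_lengths_of_one_sublists_alt
  exact clos_invariant dl 0 [] [] [] (by simp [PySem.List.count]) (by simp)
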